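-- pv_equiv track=rewrite | github.com/okara83/Becoming-a-Data-Scientist | Data Science and Machine Learning/Machine-Learning-In-Python-THOROUGH/EXAMPLES/EDABIT/EXPERT/001_100/99_almost_uniform_sequence.py | almost_uniform
-- ===== SOURCE A (Python) =====
-- def almost_uniform(nums):
--     lst, a, b = list(set(nums)), [], []
--     nums.sort()
--     lst.sort()
--     for i in range(len(lst)):
--         a.append([])
--         for j in range(nums.index(lst[i]),len(nums)):
--             if nums[j] - lst[i] in [0,1]: a[i].append(nums[j])
--             else: break
--     for i in a:
--         if len(set(i))>1: b.append(len(i))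
--     if len(b)==0: return 0
--     return max(b)
-- ===== SOURCE B (Python) =====
-- def almost_uniform(nums):
--     nums.sort()  # keep A's in-place sort of the argument
--     cnt = {}
--     for x in nums:
--         cnt[x] = cnt.get(x, 0) + 1
--     best = 0
--     for v, c in cnt.items():
--         if v + 1 in cnt:
--             best = max(best, c + cnt[v + 1])
--     return best
-- ===== Notes on version B (the rewrite author's own statement) =====
-- stated objective: faster
-- what changed: Replaces A's set/sort plus per-unique-value nums.index and inner rescanning with one counting dict built in a single pass and one pass over its items looking up v+1.
import Mathlib
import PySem

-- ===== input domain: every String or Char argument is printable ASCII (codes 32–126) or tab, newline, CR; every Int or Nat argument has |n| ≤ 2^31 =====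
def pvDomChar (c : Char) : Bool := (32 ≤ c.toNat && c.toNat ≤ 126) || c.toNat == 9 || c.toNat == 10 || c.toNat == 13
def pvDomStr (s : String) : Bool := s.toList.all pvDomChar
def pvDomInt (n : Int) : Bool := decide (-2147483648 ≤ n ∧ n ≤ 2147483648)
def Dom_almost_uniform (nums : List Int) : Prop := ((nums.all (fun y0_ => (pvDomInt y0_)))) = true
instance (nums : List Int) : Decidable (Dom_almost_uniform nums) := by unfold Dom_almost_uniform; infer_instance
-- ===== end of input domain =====

-- B replaces A's per-unique-value nums.index + rescanning with one counting dict and a single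
-- pass over its items (objective: faster). Both A and B sort the argument list in place
-- (same side effect); the equivalence proved here is about the return value.

-- ===== PORT A =====
-- inner 'for j in range(...): if nums[j]-v in [0,1]: append else break'
def auInner (snums : List Int) (v : Int) : List Int → List Int → List Int
  | [], acc => acc
  | j :: js, acc =>
    let x := PySem.List.pyGetD snums j 0
    if x - v = 0 ∨ x - v = 1 then auInner snums v js (acc ++ [x]) else acc

def almost_uniform (nums : List Int) : Int :=
  let lst0 : PySem.Set Int := PySem.Set.ofList nums
  let snums := PySem.List.sorted nums (fun x => x) false
  let lst := PySem.List.sorted lst0 (fun x => x) false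
  let a := lst.foldl (fun a v =>
      a ++ [auInner snums v
        (PySem.List.pyRange (((PySem.List.index? snums v).getD 0 : Nat) : Int)
          ((snums.length : Nat) : Int) 1) []]) ([] : List (List Int))
  let b := a.foldl (fun b i =>
      if (PySem.Set.ofList i).length > 1 then b ++ [(i.length : Int)] else b) ([] : List Int)
  if b.length = 0 then 0 else (PySem.List.max? b (fun x => x)).getD 0

-- ===== PORT B =====
def almost_uniform_alt (nums : List Int) : Int :=
  let snums := PySem.List.sorted nums (fun x => x) false
  let cnt := snums.foldl (fun d x => d.insert x (d.getD x 0 + 1)) PySem.Dict.empty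
  cnt.items.foldl (fun best p =>
      if cnt.contains (p.1 + 1) then max best (p.2 + cnt.getD (p.1 + 1) 0) else best) 0

-- ===== PRECONDITION & SPEC =====
def Spec_almost_uniform (nums : List Int) (out : Int) : Prop := out = almost_uniform_alt nums
instance (nums : List Int) (out : Int) : Decidable (Spec_almost_uniform nums out) := by unfold Spec_almost_uniform; infer_instance

-- ===== CLAIM (what is proved, stated in full; the proofs are below) =====
def Claim_equal_almost_uniform : Prop := ∀ (nums : List Int), Dom_almost_uniform nums → Spec_almost_uniform nums (almost_uniform nums)

-- ===== LEMMAS AND PROOFS =====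

lemma auInner_eq (s : List Int) (v : Int) : ∀ (n j0 : Nat), s.length - j0 = n → j0 ≤ s.length → ∀ acc,
    auInner s v (PySem.List.pyRange (j0 : Int) (s.length : Int) 1) acc
      = acc ++ (s.drop j0).takeWhile (fun x => decide (x - v = 0) || decide (x - v = 1)) := by
  intro n
  induction n with
  | zero =>
    intro j0 hn hle acc
    have hj : j0 = s.length := by omega
    subst hj
    rw [PySem.List.pyRange_one_eq_nil (by omega), List.drop_length]
    simp [auInner]
  | succ n ih =>
    intro j0 hn hle acc
    have hlt : j0 < s.length := by omega
    rw [PySem.List.pyRange_one_cons (by exact_mod_cast hlt)]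
    have h1 : ((j0 : Int) + 1) = ((j0 + 1 : Nat) : Int) := by push_cast; ring
    have hget : PySem.List.pyGetD s (j0 : Int) 0 = s[j0] := by
      rw [PySem.List.pyGetD_natCast, List.getD_eq_getElem s 0 hlt]
    have hdrop : s.drop j0 = s[j0] :: s.drop (j0 + 1) := List.drop_eq_getElem_cons hlt
    simp only [auInner, hget, h1]
    by_cases hx : s[j0] - v = 0 ∨ s[j0] - v = 1
    · rw [if_pos hx, ih (j0 + 1) (by omega) (by omega)]
      have hb : (decide (s[j0] - v = 0) || decide (s[j0] - v = 1)) = true := by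
        rcases hx with h | h <;> simp [h]
      rw [hdrop, List.takeWhile_cons_of_pos (p := fun x => decide (x - v = 0) || decide (x - v = 1)) hb]
      simp
    · rw [if_neg hx]
      simp only [hdrop, List.takeWhile_cons]
      have : (decide (s[j0] - v = 0) || decide (s[j0] - v = 1)) = false := by
        simp only [Bool.or_eq_false_iff, decide_eq_false_iff_not]; omega
      simp [this]

lemma takeWhile_eq_filter_sorted (v : Int) : ∀ (l : List Int), l.Pairwise (· ≤ ·) → (∀ x ∈ l, v ≤ x) →
    l.takeWhile (fun x => decide (x - v = 0) || decide (x - v = 1))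
      = l.filter (fun x => decide (x - v = 0) || decide (x - v = 1)) := by
  intro l
  induction l with
  | nil => simp
  | cons x t ih =>
    intro hp hge
    rcases List.pairwise_cons.mp hp with ⟨hxt, hpt⟩
    by_cases hx : (decide (x - v = 0) || decide (x - v = 1)) = true
    · rw [List.takeWhile_cons_of_pos (p := fun x => decide (x - v = 0) || decide (x - v = 1)) hx,
        List.filter_cons_of_pos (p := fun x => decide (x - v = 0) || decide (x - v = 1)) hx,
        ih hpt (fun y hy => hge y (List.mem_cons_of_mem _ hy))]
    · have hx' := hx
      rw [Bool.or_eq_true, decide_eq_true_eq, decide_eq_true_eq] at hx'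
      have hvx : v ≤ x := hge x List.mem_cons_self
      have hfilt : t.filter (fun y => decide (y - v = 0) || decide (y - v = 1)) = [] := by
        rw [List.filter_eq_nil_iff]
        intro y hy
        have := hxt y hy
        simp only [Bool.or_eq_true, decide_eq_true_eq, not_or]
        omega
      rw [List.takeWhile_cons_of_neg (p := fun x => decide (x - v = 0) || decide (x - v = 1)) (by simpa using hx),
        List.filter_cons_of_neg (p := fun x => decide (x - v = 0) || decide (x - v = 1)) (by simpa using hx), hfilt]

lemma filter_len_counts (v : Int) : ∀ (l : List Int),
    (l.filter (fun x => decide (x - v = 0) || decide (x - v = 1))).length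
      = l.count v + l.count (v + 1) := by
  intro l
  induction l with
  | nil => simp
  | cons x t ih =>
    simp only [List.filter_cons, List.count_cons]
    by_cases h0 : x = v
    · subst h0; simp; omega
    · by_cases h1 : x = v + 1
      · subst h1
        have : (v + 1 == v) = false := beq_eq_false_iff_ne.mpr (by omega)
        simp [this, ih]; omega
      · have e0 : (x == v) = false := by simp [h0]
        have e1 : (x == v + 1) = false := by simp [h1]
        have : (decide (x - v = 0) || decide (x - v = 1)) = false := by
          simp only [Bool.or_eq_false_iff, decide_eq_false_iff_not]; omega
        simpa [this, e0, e1] using ih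

lemma set_len_gt_one (v : Int) (i : List Int) (hmem : ∀ x ∈ i, x = v ∨ x = v + 1) (hv : v ∈ i) :
    ((PySem.Set.ofList i).length > 1 ↔ (v + 1) ∈ i) := by
  have hnd := PySem.Set.nodup_ofList i
  have hm : ∀ y, y ∈ PySem.Set.ofList i ↔ y ∈ i := fun y => PySem.Set.mem_ofList i y
  constructor
  · intro hlen
    rcases hS : PySem.Set.ofList i with _ | ⟨a, _ | ⟨b, t⟩⟩
    · rw [hS] at hlen; simp at hlen
    · rw [hS] at hlen; simp at hlen
    · rw [hS] at hnd hm
      have hab : a ≠ b := (List.pairwise_cons.mp hnd).1 b (by simp)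
      have ha : a ∈ i := (hm a).mp (by simp)
      have hb : b ∈ i := (hm b).mp (by simp)
      rcases hmem a ha with h1 | h1 <;> rcases hmem b hb with h2 | h2
      · omega
      · rw [← h2]; exact hb
      · rw [← h1]; exact ha
      · rw [← h2]; exact hb
  · intro h1
    have hvS := (hm v).mpr hv
    have h1S := (hm (v + 1)).mpr h1
    rcases hS : PySem.Set.ofList i with _ | ⟨a, _ | ⟨b, t⟩⟩ <;> rw [hS] at hvS h1S
    · simp at hvS
    · simp at hvS h1S; omega
    · simp

lemma foldl_add_shape {α : Type} [BEq α] : ∀ (xs : List α) (s : PySem.Set α),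
    ∃ t, xs.foldl PySem.Set.add s = s ++ t ∧ t.Sublist xs := by
  intro xs
  induction xs with
  | nil => intro s; exact ⟨[], by simp, by simp⟩
  | cons x xs ih =>
    intro s
    rcases ih (PySem.Set.add s x) with ⟨t, ht, hsub⟩
    by_cases hc : PySem.Set.contains s x = true
    · refine ⟨t, ?_, hsub.cons x⟩
      rw [List.foldl_cons, ht, PySem.Set.add, if_pos hc]
    · refine ⟨x :: t, ?_, hsub.cons₂ x⟩
      rw [List.foldl_cons, ht, PySem.Set.add, if_neg hc]
      simp

lemma ofList_sublist {α : Type} [BEq α] (xs : List α) : (PySem.Set.ofList xs).Sublist xs := by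
  rcases foldl_add_shape xs PySem.Set.empty with ⟨t, ht, hsub⟩
  rw [PySem.Set.ofList, ht]
  simpa [PySem.Set.empty] using hsub

lemma A_item (s : List Int) (v : Int) (hs : List.Pairwise (· ≤ ·) s) (hv : v ∈ s) :
    (auInner s v (PySem.List.pyRange (((PySem.List.index? s v).getD 0 : Nat) : Int) ((s.length : Nat) : Int) 1) []).length
        = s.count v + s.count (v + 1)
    ∧ ((PySem.Set.ofList (auInner s v (PySem.List.pyRange (((PySem.List.index? s v).getD 0 : Nat) : Int) ((s.length : Nat) : Int) 1) [])).length > 1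
        ↔ (v + 1) ∈ s) := by
  obtain ⟨j0, hj0⟩ := Option.isSome_iff_exists.mp ((PySem.List.index?_isSome_iff s v).mpr hv)
  obtain ⟨pre, suf, hdec, hlen, hnpre⟩ := (PySem.List.index?_eq_some_iff s v j0).mp hj0
  have hgetD : (PySem.List.index? s v).getD 0 = j0 := by rw [hj0]; rfl
  have hdrop : s.drop j0 = v :: suf := by rw [hdec, List.drop_left' hlen]
  have hj0le : j0 ≤ s.length := by rw [hdec]; simp; omega
  have hpair : List.Pairwise (· ≤ ·) (v :: suf) := by
    rw [hdec] at hs; exact (List.pairwise_append.mp hs).2.1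
  have hprele : ∀ x ∈ pre, x ≤ v := by
    rw [hdec] at hs
    intro x hx
    exact (List.pairwise_append.mp hs).2.2 x hx v (by simp)
  have hge : ∀ x ∈ v :: suf, v ≤ x := by
    intro x hx
    rcases List.mem_cons.mp hx with h | h
    · omega
    · exact (List.pairwise_cons.mp hpair).1 x h
  have hres : auInner s v (PySem.List.pyRange (((PySem.List.index? s v).getD 0 : Nat) : Int) ((s.length : Nat) : Int) 1) []
      = (v :: suf).filter (fun x => decide (x - v = 0) || decide (x - v = 1)) := by
    rw [hgetD, auInner_eq s v (s.length - j0) j0 rfl hj0le [], hdrop,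
      takeWhile_eq_filter_sorted v (v :: suf) hpair hge]
    simp
  have hcv : s.count v = (v :: suf).count v := by
    rw [hdec, List.count_append, List.count_eq_zero.mpr hnpre]; omega
  have hnpre1 : (v + 1) ∉ pre := fun hx => by have := hprele _ hx; omega
  have hcv1 : s.count (v + 1) = (v :: suf).count (v + 1) := by
    rw [hdec, List.count_append, List.count_eq_zero.mpr hnpre1]; omega
  have hmemres : ∀ x ∈ (v :: suf).filter (fun x => decide (x - v = 0) || decide (x - v = 1)), x = v ∨ x = v + 1 := by
    intro x hx
    have := (List.mem_filter.mp hx).2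
    simp only [Bool.or_eq_true, decide_eq_true_eq] at this
    omega
  have hvres : v ∈ (v :: suf).filter (fun x => decide (x - v = 0) || decide (x - v = 1)) := by
    apply List.mem_filter.mpr
    exact ⟨by simp, by simp⟩
  have hv1mem : (v + 1) ∈ (v :: suf).filter (fun x => decide (x - v = 0) || decide (x - v = 1)) ↔ (v + 1) ∈ s := by
    rw [List.mem_filter]
    constructor
    · intro h
      rw [hdec]
      exact List.mem_append.mpr (Or.inr h.1)
    · intro h
      refine ⟨?_, by simp⟩
      rw [hdec] at h
      rcases List.mem_append.mp h with h | h
      · exact absurd h hnpre1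
      · exact h
  refine ⟨?_, ?_⟩
  · rw [hres, filter_len_counts, hcv, hcv1]
  · rw [hres, set_len_gt_one v _ hmemres hvres, hv1mem]

lemma maxlist_eq (m : List Int) (h : ∀ x ∈ m, 0 ≤ x) :
    (if m.length = 0 then (0 : Int) else (PySem.List.max? m (fun y => y)).getD 0) = m.foldl max 0 := by
  cases m with
  | nil => simp
  | cons x t =>
    rw [if_neg (by simp), PySem.List.max?_id_cons]
    have hx : max 0 x = x := max_eq_right (h x (by simp))
    simp [hx]

lemma L_pairwise_lt (nums : List Int) :
    List.Pairwise (· < ·) (PySem.Set.ofList (PySem.List.sorted nums (fun x => x))) := by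
  have hle : List.Pairwise (· ≤ ·) (PySem.Set.ofList (PySem.List.sorted nums (fun x => x))) :=
    (PySem.List.sorted_pairwise nums (fun x => x)).sublist (ofList_sublist _)
  have hnd : List.Pairwise (· ≠ ·) (PySem.Set.ofList (PySem.List.sorted nums (fun x => x))) :=
    PySem.Set.nodup_ofList _
  exact (hle.and hnd).imp (fun h => lt_of_le_of_ne h.1 h.2)

lemma lst_eq (nums : List Int) :
    PySem.List.sorted (PySem.Set.ofList nums) (fun x => x)
      = PySem.Set.ofList (PySem.List.sorted nums (fun x => x)) := by
  apply PySem.List.sorted_eq_of_perm_of_pairwise_lt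
  · refine (List.perm_ext_iff_of_nodup (PySem.Set.nodup_ofList _) (PySem.Set.nodup_ofList _)).mpr ?_
    intro a
    rw [PySem.Set.mem_ofList, PySem.Set.mem_ofList, PySem.List.mem_sorted]
  · exact L_pairwise_lt nums


lemma almost_uniform_eq_alt (nums : List Int) : almost_uniform nums = almost_uniform_alt nums := by
  unfold almost_uniform almost_uniform_alt
  dsimp only
  rw [lst_eq nums]
  rw [PySem.List.foldl_append_singleton_eq_map, List.nil_append, List.foldl_map]
  rw [PySem.Dict.foldl_insert_getD_add_one_eq_counter, PySem.Dict.items_counter, List.foldl_map]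
  set s := PySem.List.sorted nums (fun x => x) with hsdef
  set L := PySem.Set.ofList s with hLdef
  have hsp : List.Pairwise (· ≤ ·) s := PySem.List.sorted_pairwise nums (fun x => x)
  have hmem : ∀ v ∈ L, v ∈ s := fun v hv => (PySem.Set.mem_ofList s v).mp hv
  -- A side: rewrite the b-building fold
  rw [PySem.List.foldl_congr_mem L _
      (fun b v => if (v + 1) ∈ s then b ++ [((s.count v : Int) + (s.count (v + 1) : Int))] else b) []
      ?hA]
  case hA =>
    intro acc v hv
    obtain ⟨hlen, hguard⟩ := A_item s v hsp (hmem v hv)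
    by_cases hg : (v + 1) ∈ s
    · simp only [if_pos (hguard.mpr hg), hlen, if_pos hg]
      push_cast
      ring_nf
    · simp only [if_neg (fun h => hg (hguard.mp h)), if_neg hg]
  rw [PySem.List.foldl_append_ite (p := fun v => (v + 1) ∈ s)
      (f := fun v => ((s.count v : Int) + (s.count (v + 1) : Int))), List.nil_append]
  -- B side: rewrite contains/getD of the counter
  rw [PySem.List.foldl_congr_mem L _
      (fun best v => if (v + 1) ∈ s then max best ((s.count v : Int) + (s.count (v + 1) : Int)) else best) 0
      ?hB]
  case hB =>
    intro acc v _
    simp [PySem.Dict.contains_counter, PySem.Dict.getD_counter]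
  rw [PySem.List.foldl_ite_eq_foldl_filter (p := fun v => (v + 1) ∈ s)
      (f := fun best v => max best ((s.count v : Int) + (s.count (v + 1) : Int)))]
  -- finish with the max characterization
  rw [maxlist_eq _ ?hpos]
  case hpos =>
    intro x hx
    obtain ⟨v, _, hxv⟩ := List.mem_map.mp hx
    rw [← hxv]
    positivity
  rw [List.foldl_map]

-- ===== VERDICT (by name: the statement is the Claim_ definition above) =====
theorem almost_uniform_spec : Claim_equal_almost_uniform := by
  intro nums _
  unfold Spec_almost_uniform
  exact almost_uniform_eq_alt nums
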